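-- pv_equiv track=rewrite | github.com/pypi-data/pypi-mirror-400 | packages/LscEncryption/lscencryption-0.0.1-py3-none-any.whl/LscEncryption/BinaryRecursiveMergeEncryption.py | binary_recursive_merge_encryption
-- ===== SOURCE A (Python) =====
-- def binary_recursive_merge_encryption(s):
--     try:
--         if len(s) <= 2:
--             return s
--         else:
--             left = []
--             right = []
--             for i in range(len(s)):
--                 if i % 2 == 0:
--                     left.append(s[i])
--                 else:
--                     right.append(s[i])
--             return brme("".join(left)) + brme("".join(right))
--     except TypeError:
--         s = str(s)
--         return brme(s)
--
-- BRME = brme = binary_recursive_merge_encryption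
-- ===== SOURCE B (Python) =====
-- def binary_recursive_merge_encryption(s):
--     # Iterative worklist (explicit stack) instead of recursion; same DFS leaf order.
--     try:
--         if len(s) <= 2:
--             return s
--     except TypeError:
--         return binary_recursive_merge_encryption(str(s))
--     out = []
--     stack = [s]
--     while stack:
--         t = stack.pop()
--         if len(t) <= 2:
--             out.append(t)
--         else:
--             stack.append(t[1::2])
--             stack.append(t[0::2])
--     return "".join(out)
-- ===== Notes on version B (the rewrite author's own statement) =====
-- stated objective: alternative
-- what changed: Replaces A's recursion (per-character index loop building left/right lists, then two recursive calls joined) by an iterative explicit-stack worklist that pops a segment, emits it if short, otherwise pushes its odd-index half then its even-index half taken by extended slicing, concatenating leaves left-to-right with one final join.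
import Mathlib
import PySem

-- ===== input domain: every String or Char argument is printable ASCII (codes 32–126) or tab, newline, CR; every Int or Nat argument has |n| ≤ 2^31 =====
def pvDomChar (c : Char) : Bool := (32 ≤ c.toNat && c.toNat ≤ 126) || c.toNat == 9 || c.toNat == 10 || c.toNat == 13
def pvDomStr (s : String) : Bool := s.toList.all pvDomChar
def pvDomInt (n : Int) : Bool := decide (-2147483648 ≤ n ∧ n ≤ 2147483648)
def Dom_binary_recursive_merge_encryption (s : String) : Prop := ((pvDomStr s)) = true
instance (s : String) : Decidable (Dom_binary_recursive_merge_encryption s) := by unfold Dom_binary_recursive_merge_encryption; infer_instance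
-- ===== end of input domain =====

-- B replaces A's recursion by an iterative explicit-stack worklist with the same leaf order (alternative decomposition, same cost).


-- ===== PORT A =====
-- A's loop 'for i in range(len(s)): …append(s[i])…' as a foldl over range; the index is always
-- in range, so pyGetD's default is never used
def pvStepA (l : List Char) (acc : List Char × List Char) (i : Int) : List Char × List Char :=
  let c := PySem.List.pyGetD l i ' '
  if PySem.Int.mod i 2 == 0 then (acc.1 ++ [c], acc.2) else (acc.1, acc.2 ++ [c])

-- fuel is a totality guard only: the recursion depth on a string of length > 2 strictly
-- decreases the length, so fuel = l.length always suffices (proved in pvBrmeA_fuel below)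
def pvBrmeA (fuel : Nat) (l : List Char) : List Char :=
  match fuel with
  | 0 => l
  | fuel + 1 =>
    if l.length ≤ 2 then l
    else
      let lr := (PySem.List.pyRange 0 (l.length : Int) 1).foldl (pvStepA l) ([], [])
      pvBrmeA fuel lr.1 ++ pvBrmeA fuel lr.2

def binary_recursive_merge_encryption (s : String) : String :=
  String.ofList (pvBrmeA s.toList.length s.toList)

-- ===== PORT B =====
-- pvEvens l = l[0::2], pvOdds l = l[1::2] (hand port of extended slicing, exact: chars at even / odd positions)
mutual
def pvEvens : List Char → List Char
  | [] => []
  | c :: t => c :: pvOdds t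
def pvOdds : List Char → List Char
  | [] => []
  | _ :: t => pvEvens t
end

-- the Lean stack list's head is the top of Source B's python stack (python pops/appends at the end);
-- fuel is a totality guard only: the loop runs at most 2 * len(s) iterations (proved in pvBrmeLoop_fuel below)
def pvBrmeLoop (fuel : Nat) (stack : List (List Char)) (out : List Char) : List Char :=
  match fuel, stack with
  | _, [] => out
  | 0, _ => out
  | fuel + 1, t :: rest =>
    if t.length ≤ 2 then pvBrmeLoop fuel rest (out ++ t)
    else pvBrmeLoop fuel (pvEvens t :: pvOdds t :: rest) out

def binary_recursive_merge_encryption_alt (s : String) : String :=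
  if PySem.Str.len s ≤ 2 then s
  else String.ofList (pvBrmeLoop (2 * s.toList.length) [s.toList] [])

-- ===== PRECONDITION & SPEC =====
def Spec_binary_recursive_merge_encryption (s : String) (out : String) : Prop := out = binary_recursive_merge_encryption_alt s
instance (s : String) (out : String) : Decidable (Spec_binary_recursive_merge_encryption s out) := by unfold Spec_binary_recursive_merge_encryption; infer_instance

-- ===== CLAIM (what is proved, stated in full; the proofs are below) =====
def Claim_equal_binary_recursive_merge_encryption : Prop := ∀ (s : String), Dom_binary_recursive_merge_encryption s → Spec_binary_recursive_merge_encryption s (binary_recursive_merge_encryption s)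

-- ===== LEMMAS AND PROOFS =====

theorem pvEvensOdds_length : ∀ l : List Char,
    (pvEvens l).length = (l.length + 1) / 2 ∧ (pvOdds l).length = l.length / 2 := by
  intro l
  induction l with
  | nil => simp [pvEvens, pvOdds]
  | cons c t ih =>
    refine ⟨?_, ?_⟩
    · simp [pvEvens, ih.2]
      omega
    · simp [pvOdds, ih.1]

theorem pvTwoPowSplit (n : Nat) (h : 3 ≤ n) : 2 ^ ((n + 1) / 2) + 2 ^ (n / 2) < 2 ^ n := by
  obtain ⟨m, rfl⟩ : ∃ m, n = m + 3 := ⟨n - 3, by omega⟩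
  have h1 : 2 ^ ((m + 3 + 1) / 2) ≤ 2 ^ (m + 2) := Nat.pow_le_pow_right (by norm_num) (by omega)
  have h2 : 2 ^ ((m + 3) / 2) ≤ 2 ^ (m + 1) := Nat.pow_le_pow_right (by norm_num) (by omega)
  have h3 : 0 < 2 ^ m := Nat.two_pow_pos m
  have e1 : 2 ^ (m + 1) = 2 ^ m * 2 := pow_succ 2 m
  have e2 : 2 ^ (m + 2) = 2 ^ (m + 1) * 2 := pow_succ 2 (m + 1)
  have e3 : 2 ^ (m + 3) = 2 ^ (m + 2) * 2 := pow_succ 2 (m + 2)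
  omega

-- the (fuel-free) recursion both ports compute
def pvIdeal (l : List Char) : List Char :=
  if l.length ≤ 2 then l
  else pvIdeal (pvEvens l) ++ pvIdeal (pvOdds l)
termination_by l.length
decreasing_by
  · have := pvEvensOdds_length l
    omega
  · have := pvEvensOdds_length l
    omega

-- number of pops B's loop performs to consume one segment
def pvSteps (l : List Char) : Nat :=
  if l.length ≤ 2 then 1
  else 1 + pvSteps (pvEvens l) + pvSteps (pvOdds l)
termination_by l.length
decreasing_by
  · have := pvEvensOdds_length l
    omega
  · have := pvEvensOdds_length l
    omega

theorem pvSteps_le (l : List Char) (h : 1 ≤ l.length) : pvSteps l ≤ 2 * l.length - 1 := by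
  induction hl : l.length using Nat.strong_induction_on generalizing l with
  | _ n ih =>
    subst hl
    by_cases h2 : l.length ≤ 2
    · rw [pvSteps, if_pos h2]
      omega
    · have hlen := pvEvensOdds_length l
      have he := ih (pvEvens l).length (by omega) (pvEvens l) (by omega) rfl
      have ho := ih (pvOdds l).length (by omega) (pvOdds l) (by omega) rfl
      rw [pvSteps, if_neg h2]
      omega

theorem pvStepA_range : ∀ (t s : List Char) (k : Nat), s.drop k = t → ∀ (L R : List Char),
    (PySem.List.pyRange (k : Int) (s.length : Int) 1).foldl (pvStepA s) (L, R) =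
      if k % 2 = 0 then (L ++ pvEvens t, R ++ pvOdds t) else (L ++ pvOdds t, R ++ pvEvens t) := by
  intro t
  induction t with
  | nil =>
    intro s k hk L R
    have hle : s.length ≤ k := by
      by_contra hlt
      have := List.length_drop (l := s) (i := k)
      simp [hk] at this; omega
    rw [PySem.List.pyRange_one_eq_nil (by exact_mod_cast hle)]
    simp [pvEvens, pvOdds]
  | cons c t' ih =>
    intro s k hk L R
    have hlen := congrArg List.length hk
    simp at hlen
    have hklt : k < s.length := by omega
    have hget : s[k] = c := by
      have h0 : (s.drop k)[0]'(by simp [hk]) = c := by simp [hk]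
      simpa [List.getElem_drop] using h0
    rw [PySem.List.pyRange_one_cons (by exact_mod_cast hklt)]
    have hdrop' : s.drop (k + 1) = t' := by
      have h1 : s.drop (k + 1) = (s.drop k).tail := by rw [List.tail_drop]
      simp [h1, hk]
    have hstep : pvStepA s (L, R) (k : Int) =
        if k % 2 = 0 then (L ++ [c], R) else (L, R ++ [c]) := by
      have hc : PySem.List.pyGetD s (k : Int) ' ' = c := by
        simp [PySem.List.pyGetD_natCast, List.getD_eq_getElem?_getD, hget, hklt]
      have hm : (PySem.Int.mod (k : Int) 2 == 0) = decide (k % 2 = 0) := by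
        have hf : (k : Int).fmod 2 = (k : Int) % 2 := by
          rw [Int.fmod_eq_emod]
          simp
        by_cases hp : k % 2 = 0 <;> simp [PySem.Int.mod, hf, hp] <;> omega
      simp only [pvStepA, hc, hm]
      by_cases hpar : k % 2 = 0 <;> simp [hpar]
    rw [List.foldl_cons, hstep]
    have hcast : ((k : Int) + 1) = ((k + 1 : Nat) : Int) := by push_cast; ring
    by_cases hpar : k % 2 = 0
    · rw [if_pos hpar, if_pos hpar, hcast, ih s (k + 1) hdrop' (L ++ [c]) R,
        if_neg (by omega : ¬ (k + 1) % 2 = 0)]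
      simp [pvEvens, pvOdds]
    · rw [if_neg hpar, if_neg hpar, hcast, ih s (k + 1) hdrop' L (R ++ [c]),
        if_pos (by omega : (k + 1) % 2 = 0)]
      simp [pvEvens, pvOdds]

theorem pvStepA_main (l : List Char) :
    (PySem.List.pyRange 0 (l.length : Int) 1).foldl (pvStepA l) ([], []) = (pvEvens l, pvOdds l) := by
  have := pvStepA_range l l 0 (by simp) [] []
  simpa using this

theorem pvBrmeA_fuel : ∀ (fuel : Nat) (l : List Char), l.length ≤ fuel → pvBrmeA fuel l = pvIdeal l := by
  intro fuel
  induction fuel with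
  | zero =>
    intro l h
    have : l.length ≤ 2 := by omega
    rw [pvBrmeA, pvIdeal, if_pos this]
  | succ f ih =>
    intro l h
    by_cases h2 : l.length ≤ 2
    · rw [pvBrmeA, if_pos h2, pvIdeal, if_pos h2]
    · have hlen := pvEvensOdds_length l
      rw [pvBrmeA, if_neg h2, pvIdeal, if_neg h2]
      simp only [pvStepA_main]
      rw [ih (pvEvens l) (by omega), ih (pvOdds l) (by omega)]

theorem pvBrmeLoop_fuel : ∀ (meas : Nat) (stack : List (List Char)) (fuel : Nat) (out : List Char),
    (stack.map (fun t => 2 ^ t.length)).sum ≤ meas →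
    (stack.map pvSteps).sum ≤ fuel →
    pvBrmeLoop fuel stack out = out ++ (stack.map pvIdeal).flatten := by
  intro meas
  induction meas with
  | zero =>
    intro stack fuel out hm _
    have hnil : stack = [] := by
      cases stack with
      | nil => rfl
      | cons t rest =>
        exfalso
        have := Nat.two_pow_pos t.length
        simp only [List.map_cons, List.sum_cons] at hm
        omega
    subst hnil
    cases fuel <;> simp [pvBrmeLoop]
  | succ m ih =>
    intro stack fuel out hm hf
    cases stack with
    | nil => cases fuel <;> simp [pvBrmeLoop]
    | cons t rest =>
      have hpos : 1 ≤ pvSteps t := by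
        rw [pvSteps]
        split <;> omega
      have hfuel1 : 1 ≤ fuel := by
        simp at hf
        omega
      obtain ⟨f, rfl⟩ : ∃ f, fuel = f + 1 := ⟨fuel - 1, by omega⟩
      have hpow := Nat.two_pow_pos t.length
      by_cases h2 : t.length ≤ 2
      · rw [pvBrmeLoop, if_pos h2]
        have hst : pvSteps t = 1 := by rw [pvSteps, if_pos h2]
        have hid : pvIdeal t = t := by rw [pvIdeal, if_pos h2]
        rw [ih rest f (out ++ t) (by simp at hm ⊢; omega) (by simp [hst] at hf ⊢; omega)]
        simp [hid]
      · rw [pvBrmeLoop, if_neg h2]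
        have hlen := pvEvensOdds_length t
        have hsplit := pvTwoPowSplit t.length (by omega)
        have hst : pvSteps t = 1 + pvSteps (pvEvens t) + pvSteps (pvOdds t) := by
          rw [pvSteps, if_neg h2]
        have hid : pvIdeal t = pvIdeal (pvEvens t) ++ pvIdeal (pvOdds t) := by
          rw [pvIdeal, if_neg h2]
        rw [ih (pvEvens t :: pvOdds t :: rest) f out
          (by simp [hlen.1, hlen.2] at hm ⊢; omega)
          (by simp [hst] at hf ⊢; omega)]
        simp [hid]

-- ===== VERDICT (by name: the statement is the Claim_ definition above) =====
theorem binary_recursive_merge_encryption_spec : Claim_equal_binary_recursive_merge_encryption := by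
  intro s _
  unfold Spec_binary_recursive_merge_encryption
  unfold binary_recursive_merge_encryption binary_recursive_merge_encryption_alt
  rw [pvBrmeA_fuel s.toList.length s.toList le_rfl]
  by_cases h : PySem.Str.len s ≤ 2
  · rw [if_pos h]
    have hl : s.toList.length ≤ 2 := by
      have := PySem.Str.len_eq s
      omega
    rw [pvIdeal, if_pos hl]
    simp
  · rw [if_neg h]
    have hl : 3 ≤ s.toList.length := by
      have := PySem.Str.len_eq s
      omega
    rw [pvBrmeLoop_fuel (2 ^ s.toList.length) [s.toList] (2 * s.toList.length) []
      (by simp)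
      (by
        have := pvSteps_le s.toList (by omega)
        simp only [List.map_cons, List.map_nil, List.sum_cons, List.sum_nil]
        omega)]
    simp
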